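-- pv_equiv track=rewrite | github.com/Rudy1995T/SubnetTrader | app/backtest/per_regime_report.py | _strategy_family
-- ===== SOURCE A (Python) =====
-- def _strategy_family(strategy_id: str) -> str:
--     """Collapse a per-config id (``ema_A1``, ``meanrev_F2``, ``flow``…) to
--     the gate family (``ema``/``flow``/``mr``/``yield``). Unknown ids map
--     to an empty string so they're excluded from suggestions.
--     """
--     sid = strategy_id.lower()
--     for prefix, family in (
--         ("ema", "ema"),
--         ("flow", "flow"),
--         ("meanrev", "mr"),
--         ("mr", "mr"),
--         ("yield", "yield"),
--     ):
--         if sid == prefix or sid.startswith(prefix + "_"):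
--             return family
--     return ""
-- ===== SOURCE B (Python) =====
-- _FAMILIES = {"ema": "ema", "flow": "flow", "meanrev": "mr", "mr": "mr", "yield": "yield"}
--
--
-- def _strategy_family(strategy_id: str) -> str:
--     token = strategy_id.lower().split("_", 1)[0]
--     return _FAMILIES.get(token, "")
-- ===== Notes on version B (the rewrite author's own statement) =====
-- stated objective: simpler
-- what changed: Instead of scanning five prefix/family pairs and testing equality-or-prefix for each, B extracts the first underscore-separated segment of the lowercased id once and returns a single dict lookup with an empty-string default.
import Mathlib
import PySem

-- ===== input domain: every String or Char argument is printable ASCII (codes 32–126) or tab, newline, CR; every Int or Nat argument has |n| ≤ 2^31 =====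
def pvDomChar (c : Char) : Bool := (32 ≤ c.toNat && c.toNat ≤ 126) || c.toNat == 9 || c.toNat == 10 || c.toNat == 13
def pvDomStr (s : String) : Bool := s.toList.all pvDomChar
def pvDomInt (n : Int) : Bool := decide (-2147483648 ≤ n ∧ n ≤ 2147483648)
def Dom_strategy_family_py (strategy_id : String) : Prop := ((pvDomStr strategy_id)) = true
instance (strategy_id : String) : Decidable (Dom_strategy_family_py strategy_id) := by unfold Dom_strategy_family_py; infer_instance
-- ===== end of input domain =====

-- B replaces A's scan over five (prefix, family) pairs by extracting the first
-- underscore-segment once and doing a single dict lookup (objective: simpler).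

-- ===== PORT A =====
-- A's loop over the literal tuple of (prefix, family) pairs with an early return;
-- 'prefix + "_"' is concatenation on the char lists (exact for Python str +).
def famLoop (sid : List Char) : List (List Char × String) → String
  | [] => ""
  | (p, f) :: rest =>
      if sid = p || PySem.Chars.startswith sid (p ++ ['_']) then f else famLoop sid rest

def strategy_family_py (strategy_id : String) : String :=
  let sid := PySem.Str.lower strategy_id
  famLoop sid.toList
    [("ema".toList, "ema"), ("flow".toList, "flow"), ("meanrev".toList, "mr"),
     ("mr".toList, "mr"), ("yield".toList, "yield")]

-- ===== PORT B =====
def famDict : PySem.Dict String String :=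
  PySem.Dict.ofList [("ema", "ema"), ("flow", "flow"), ("meanrev", "mr"), ("mr", "mr"), ("yield", "yield")]

-- Source B: token = strategy_id.lower().split("_", 1)[0]; the separator "_" is nonempty so
-- splitMax? is always `some`, and split always yields a nonempty list, so [0] never raises
-- (hence .getD [] / .headD "" are exact here).
def strategy_family_py_alt (strategy_id : String) : String :=
  let token := (((PySem.Str.splitMax? (PySem.Str.lower strategy_id) "_" 1).getD []).headD "")
  PySem.Dict.getD famDict token ""

-- ===== PRECONDITION & SPEC =====
def Spec_strategy_family_py (strategy_id : String) (out : String) : Prop := out = strategy_family_py_alt strategy_id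
instance (strategy_id : String) (out : String) : Decidable (Spec_strategy_family_py strategy_id out) := by unfold Spec_strategy_family_py; infer_instance

-- ===== CLAIM (what is proved, stated in full; the proofs are below) =====
def Claim_equal_strategy_family_py : Prop := ∀ (strategy_id : String), Dom_strategy_family_py strategy_id → Spec_strategy_family_py strategy_id (strategy_family_py strategy_id)

-- ===== LEMMAS AND PROOFS =====

-- evaluating B's literal-dict lookup as a chain of comparisons on the key's characters
lemma dict_eval (t : String) : famDict.getD t "" =
    (if t.toList = ['e','m','a'] then "ema" else if t.toList = ['f','l','o','w'] then "flow"
     else if t.toList = ['m','e','a','n','r','e','v'] then "mr" else if t.toList = ['m','r'] then "mr"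
     else if t.toList = ['y','i','e','l','d'] then "yield" else "") := by
  have conv : ∀ (u : String), (u == t) = decide (t.toList = u.toList) := by
    intro u
    by_cases h : t.toList = u.toList
    · have hu : u = t := String.toList_inj.mp h.symm
      subst hu; simp
    · have hu : u ≠ t := fun e => h (by rw [e])
      simp [hu, h]
  simp only [famDict, PySem.Dict.ofList, PySem.Dict.getD, PySem.Dict.empty, PySem.Dict.update,
    PySem.Dict.insert, PySem.Dict.get?, List.foldl, conv]
  by_cases h1 : t.toList = ['e','m','a'] <;>
    by_cases h2 : t.toList = ['f','l','o','w'] <;>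
      by_cases h3 : t.toList = ['m','e','a','n','r','e','v'] <;>
        by_cases h4 : t.toList = ['m','r'] <;>
          by_cases h5 : t.toList = ['y','i','e','l','d'] <;>
            simp_all

-- after the first separator hit, the head of the accumulated result is the piece already closed
lemma go_zero (fuel : Nat) (l : List Char) (p : List Char) :
    (PySem.Chars.splitOnMax.go ['_'] fuel 0 l [] [p]).headD [] = p := by
  cases fuel <;> cases l <;> simp [PySem.Chars.splitOnMax.go]

-- head of split("_", 1) is takeWhile (· ≠ '_')
lemma go_one (fuel : Nat) : ∀ (l cur : List Char), l.length ≤ fuel →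
    (PySem.Chars.splitOnMax.go ['_'] fuel 1 l cur []).headD [] =
      cur.reverse ++ l.takeWhile (· ≠ '_') := by
  induction fuel with
  | zero =>
      intro l cur h
      have : l = [] := List.eq_nil_of_length_eq_zero (Nat.le_zero.mp h)
      subst this; simp [PySem.Chars.splitOnMax.go]
  | succ n ih =>
      intro l cur h
      cases l with
      | nil => simp [PySem.Chars.splitOnMax.go]
      | cons c rest =>
          by_cases hc : c = '_'
          · subst hc
            simp only [PySem.Chars.splitOnMax.go, List.isPrefixOf, if_neg (by decide : ¬(1 = 0))]
            simpa [List.takeWhile] using go_zero n rest cur.reverse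
          · simp only [PySem.Chars.splitOnMax.go]
            have hpre : (['_'].isPrefixOf (c :: rest)) = false := by
              simp [List.isPrefixOf]; exact fun h => (hc h.symm).elim
            simp only [hpre, if_neg (by decide : ¬(1 = 0)), Bool.false_eq_true, if_false]
            rw [ih rest (c :: cur) (by simpa using Nat.le_of_succ_le_succ h)]
            simp [List.takeWhile, hc]

lemma firstPiece_eq (s : List Char) :
    (PySem.Chars.splitOnMax s ['_'] 1).headD [] = s.takeWhile (· ≠ '_') := by
  simp only [PySem.Chars.splitOnMax, if_neg (by decide : ¬((1:Int) < 0))]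
  simpa using go_one (s.length + 1) s [] (Nat.le_succ _)

-- the first underscore-segment equals p iff the string is p or starts with p followed by '_'
lemma takeWhile_eq_iff : ∀ (s p : List Char), '_' ∉ p →
    (s.takeWhile (· ≠ '_') = p ↔ (s = p ∨ (p ++ ['_']) <+: s)) := by
  intro s
  induction s with
  | nil =>
      intro p _
      constructor
      · intro h; exact Or.inl h
      · rintro (h | ⟨t, ht⟩)
        · exact h
        · exact absurd (congrArg List.length ht) (by simp)
  | cons c rest ih =>
      intro p hp
      by_cases hc : c = '_'
      · subst hc
        cases p with
        | nil =>
            simp [List.takeWhile_cons_of_neg]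
        | cons q p' =>
            have hq : q ≠ '_' := fun h => hp (h ▸ List.mem_cons_self ..)
            rw [List.takeWhile_cons_of_neg (by simp)]
            constructor
            · intro h; exact absurd h (by simp)
            · rintro (h | h)
              · injection h with h1 _; exact (hq h1.symm).elim
              · rw [List.cons_append, List.cons_prefix_cons] at h
                exact (hq h.1).elim
      · rw [List.takeWhile_cons_of_pos (by simp [hc])]
        cases p with
        | nil =>
            constructor
            · intro h; exact absurd h (by simp)
            · rintro (h | h)
              · exact absurd h (by simp)
              · rw [List.nil_append, List.cons_prefix_cons] at h
                exact (hc h.1.symm).elim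
        | cons q p' =>
            have hp' : '_' ∉ p' := fun h => hp (List.mem_cons_of_mem _ h)
            rw [List.cons_eq_cons, ih p' hp', List.cons_append, List.cons_prefix_cons,
              List.cons_eq_cons]
            constructor
            · rintro ⟨h1, (h2 | h2)⟩
              · exact Or.inl ⟨h1, h2⟩
              · exact Or.inr ⟨h1.symm, h2⟩
            · rintro (⟨h1, h2⟩ | ⟨h1, h2⟩)
              · exact ⟨h1, Or.inl h2⟩
              · exact ⟨h1.symm, Or.inr h2⟩

theorem strategy_family_py_spec : Claim_equal_strategy_family_py := by
  intro s _
  unfold Spec_strategy_family_py strategy_family_py strategy_family_py_alt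
  have htok : ((((PySem.Str.splitMax? (PySem.Str.lower s) "_" 1).getD []).headD "")).toList
      = ((PySem.Str.lower s).toList).takeWhile (· ≠ '_') := by
    have h := PySem.Str.splitMax?_map (PySem.Str.lower s) "_" 1
    simp only [PySem.Chars.splitMax?, show ("_".toList : List Char) = ['_'] from rfl,
      if_neg (by decide : ¬(['_'] : List Char).isEmpty = true)] at h
    rcases ho : PySem.Str.splitMax? (PySem.Str.lower s) "_" 1 with _ | pieces
    · rw [ho] at h; simp at h
    · rw [ho] at h
      simp only [Option.map_some, Option.some.injEq] at h
      rw [← firstPiece_eq, ← h]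
      cases pieces <;> simp
  have cond : ∀ (p : List Char), '_' ∉ p →
      ((decide ((PySem.Str.lower s).toList = p))
          || PySem.Chars.startswith (PySem.Str.lower s).toList (p ++ ['_']))
        = decide (((((PySem.Str.splitMax? (PySem.Str.lower s) "_" 1).getD []).headD "")).toList = p) := by
    intro p hp
    rw [Bool.eq_iff_iff]
    simp only [Bool.or_eq_true, decide_eq_true_eq, PySem.Chars.startswith_iff]
    rw [← takeWhile_eq_iff (PySem.Str.lower s).toList p hp, htok]
  simp only [famLoop]
  rw [cond "ema".toList (by decide), cond "flow".toList (by decide),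
    cond "meanrev".toList (by decide), cond "mr".toList (by decide),
    cond "yield".toList (by decide)]
  simp only [decide_eq_true_eq]
  rw [dict_eval]
  rfl

-- ===== VERDICT (by name: the statement is the Claim_ definition above) =====
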